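-- pv_equiv track=rewrite | github.com/pktstorm/thirlwallca | backend/app/services/gedcom_service.py | _group_records
-- ===== SOURCE A (Python) =====
-- def _group_records(lines: list[str]) -> list[list[str]]:
--     """Group GEDCOM lines into top-level records (delimited by level-0 lines)."""
--     records: list[list[str]] = []
--     current: list[str] = []
--     for line in lines:
--         stripped = line.strip()
--         if not stripped:
--             continue
--         if stripped[0] == "0" and current:
--             records.append(current)
--             current = []
--         current.append(stripped)
--     if current:
--         records.append(current)
--     return records
-- ===== SOURCE B (Python) =====
-- def _group_records(lines: list[str]) -> list[list[str]]:
--     """Group GEDCOM lines into top-level records (delimited by level-0 lines)."""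
--     cleaned = [s for line in lines if (s := line.strip())]
--
--     def split(xs: list[str]) -> list[list[str]]:
--         if not xs:
--             return []
--         j = 1
--         while j < len(xs) and xs[j][0] != "0":
--             j += 1
--         return [xs[:j]] + split(xs[j:])
--
--     return split(cleaned)
-- ===== Notes on version B (the rewrite author's own statement) =====
-- stated objective: alternative
-- what changed: Replaced the incremental append-and-flush state machine with a two-phase design: first strip-and-filter the lines, then recursively split the cleaned list at level-0 boundary lines.
import Mathlib
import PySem

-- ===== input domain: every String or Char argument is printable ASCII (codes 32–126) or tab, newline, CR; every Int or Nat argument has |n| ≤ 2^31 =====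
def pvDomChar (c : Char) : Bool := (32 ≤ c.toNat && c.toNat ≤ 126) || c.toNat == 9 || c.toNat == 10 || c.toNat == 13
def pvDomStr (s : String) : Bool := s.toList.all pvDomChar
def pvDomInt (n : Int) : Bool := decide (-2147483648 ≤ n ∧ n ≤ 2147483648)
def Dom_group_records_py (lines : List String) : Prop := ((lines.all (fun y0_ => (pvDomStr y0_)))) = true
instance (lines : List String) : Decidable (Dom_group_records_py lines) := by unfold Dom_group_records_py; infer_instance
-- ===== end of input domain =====

-- B differs from A: instead of A's one-pass append-and-flush state machine, B first
-- strips and drops blank lines, then splits the cleaned list at level-0 lines.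

-- ===== PORT A =====
-- A's loop body: strip, skip blanks, flush `current` when a level-0 line starts and
-- `current` is nonempty, then append the stripped line to `current`.
def groupStepA (st : List (List String) × List String) (line : String) :
    List (List String) × List String :=
  let stripped := PySem.Str.strip line
  if stripped = "" then st
  else if stripped.toList.head? = some '0' ∧ st.2 ≠ [] then (st.1 ++ [st.2], [stripped])
  else (st.1, st.2 ++ [stripped])

def group_records_py (lines : List String) : List (List String) :=
  let st := lines.foldl groupStepA ([], [])
  if st.2 ≠ [] then st.1 ++ [st.2] else st.1

-- ===== PORT B =====
-- Source B: `j` scans past non-level-0 lines, so xs[:j] = head :: takeWhile, xs[j:] = dropWhile.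
def pvNotZero (s : String) : Bool := !(s.toList.head? == some '0')

def groupSplit : List String → List (List String)
  | [] => []
  | x :: rest =>
      (x :: rest.takeWhile pvNotZero) :: groupSplit (rest.dropWhile pvNotZero)
  termination_by xs => xs.length
  decreasing_by
    simpa using Nat.lt_succ_of_le (List.length_dropWhile_le pvNotZero rest)

def group_records_py_alt (lines : List String) : List (List String) :=
  groupSplit ((lines.map PySem.Str.strip).filter (fun s => s ≠ ""))

-- ===== PRECONDITION & SPEC =====
def Spec_group_records_py (lines : List String) (out : List (List String)) : Prop := out = group_records_py_alt lines
instance (lines : List String) (out : List (List String)) : Decidable (Spec_group_records_py lines out) := by unfold Spec_group_records_py; infer_instance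

-- ===== CLAIM (what is proved, stated in full; the proofs are below) =====
def Claim_equal_group_records_py : Prop := ∀ (lines : List String), Dom_group_records_py lines → Spec_group_records_py lines (group_records_py lines)

-- ===== LEMMAS AND PROOFS =====

-- A's step on an already-cleaned (stripped, nonempty) line
def cleanStep (st : List (List String) × List String) (s : String) :
    List (List String) × List String :=
  if s.toList.head? = some '0' ∧ st.2 ≠ [] then (st.1 ++ [st.2], [s])
  else (st.1, st.2 ++ [s])

def finishSt (st : List (List String) × List String) : List (List String) :=
  if st.2 ≠ [] then st.1 ++ [st.2] else st.1

lemma foldl_groupStepA_eq (lines : List String) (st : List (List String) × List String) :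
    lines.foldl groupStepA st
      = ((lines.map PySem.Str.strip).filter (fun s => s ≠ "")).foldl cleanStep st := by
  induction lines generalizing st with
  | nil => rfl
  | cons l ls ih =>
      simp only [List.foldl_cons, List.map_cons, List.filter_cons]
      by_cases h : PySem.Str.strip l = ""
      · simp [groupStepA, h, ih]
      · simp [groupStepA, cleanStep, h, ih]

lemma main_invariant (xs : List String) (recs : List (List String))
    (cur : List String) (hcur : cur ≠ []) :
    finishSt (xs.foldl cleanStep (recs, cur))
      = recs ++ (cur ++ xs.takeWhile pvNotZero) :: groupSplit (xs.dropWhile pvNotZero) := by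
  induction xs generalizing recs cur with
  | nil => simp [finishSt, hcur, groupSplit]
  | cons x rest ih =>
      by_cases hx : pvNotZero x = true
      · have hx' : ¬ (x.toList.head? = some '0') := by
          simpa [pvNotZero] using hx
        simp only [List.foldl_cons, List.takeWhile_cons, List.dropWhile_cons, hx]
        rw [show cleanStep (recs, cur) x = (recs, cur ++ [x]) from by
          simp [cleanStep, hx']]
        rw [ih recs (cur ++ [x]) (by simp)]
        simp
      · have hx' : x.toList.head? = some '0' := by
          by_contra hc
          exact hx (by simpa [pvNotZero] using hc)
        simp only [List.foldl_cons, List.takeWhile_cons, List.dropWhile_cons, hx]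
        rw [show cleanStep (recs, cur) x = (recs ++ [cur], [x]) from by
          simp [cleanStep, hx', hcur]]
        rw [ih (recs ++ [cur]) [x] (by simp)]
        simp [groupSplit]

-- ===== VERDICT (by name: the statement is the Claim_ definition above) =====
theorem group_records_py_spec : Claim_equal_group_records_py := by
  intro lines _
  unfold Spec_group_records_py group_records_py group_records_py_alt
  rw [foldl_groupStepA_eq]
  generalize (lines.map PySem.Str.strip).filter (fun s => s ≠ "") = xs
  cases xs with
  | nil => simp [groupSplit]
  | cons x rest =>
      have h0 : cleanStep ([], []) x = ([], [x]) := by simp [cleanStep]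
      show finishSt ((x :: rest).foldl cleanStep ([], [])) = _
      rw [List.foldl_cons, h0, main_invariant rest [] [x] (by simp), groupSplit]
      simp
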